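-- pv_equiv track=rewrite | github.com/coreylynch00/CollegeCodeRepo | Python/SecondYear/Simulators/SimVictim.py | getRefHistory
-- ===== SOURCE A (Python) =====
-- def getRefHistory(usePattern):
-- 	"Generate reference history in LRU order"
--
-- #find LRU page in the use pattern that is ordered with least recent reference last
-- 	head=0					#index of head of list
-- 	page=0					#index of page number in RAM
-- 	numRefs=len(usePattern)	#number of references in the use pattern of references
-- 	referenceOrder=[]		#to hold indexes of pages in 'most recent reference first' order
-- 	thisPage=[]				#no page dealt with yet
--
-- 	i=numRefs-1				#start at end of use pattern list with most recent reference
-- 	while i >=0:									#while not finished looking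
-- 		if usePattern[i] not in referenceOrder:			#if this reference not in list of references already
-- 			referenceOrder.append(usePattern[i])			#add it to the list
-- 			thisPage=usePattern[i]							#record which page has just been added
-- 		i=i-1										#move to next page in use pattern
-- 		while i > numRefs and usePattern[i] == thisPage:	#while not finished and current page is the page last added
-- 			i-=1												#move to next page in use pattern
-- 	referenceOrder.reverse()			#sort reference history into 'most recent first'
--
-- 	return referenceOrder	#return LRU reference history in 'least first' order
-- ===== SOURCE B (Python) =====
-- def getRefHistory(usePattern):
--     "Generate reference history in LRU order"
--     # Single forward pass: dict used as an ordered set; re-inserting a page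
--     # after deleting it moves it to the end, so key order ends up
--     # least-recently-referenced first.
--     order = {}
--     for page in usePattern:
--         if page in order:
--             del order[page]
--         order[page] = None
--     return list(order)
-- ===== Notes on version B (the rewrite author's own statement) =====
-- stated objective: idiomatic
-- what changed: Replaces the backward index walk that collects unseen pages into a list (with a list membership scan and a final reverse) by a single forward pass over an insertion-ordered dict used as an ordered set, deleting and re-inserting each page to move it to the end; the dict's key order is directly the LRU order, no reverse step.
import Mathlib
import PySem

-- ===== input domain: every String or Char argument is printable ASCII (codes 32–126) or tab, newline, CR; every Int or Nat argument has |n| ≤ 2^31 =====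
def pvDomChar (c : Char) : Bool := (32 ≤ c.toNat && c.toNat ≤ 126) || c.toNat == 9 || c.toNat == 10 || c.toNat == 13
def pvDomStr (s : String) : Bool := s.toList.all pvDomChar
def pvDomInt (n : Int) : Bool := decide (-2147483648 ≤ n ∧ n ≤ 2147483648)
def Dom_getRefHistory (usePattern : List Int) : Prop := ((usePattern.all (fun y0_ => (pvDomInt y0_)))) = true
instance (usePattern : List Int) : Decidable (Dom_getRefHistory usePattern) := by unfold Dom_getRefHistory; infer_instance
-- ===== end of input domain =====

-- B replaces A's backward index walk + list membership scan + final reverse by one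
-- forward pass over an insertion-ordered dict used as an ordered set (idiomatic; return value only, no mutation involved).

-- ===== PORT A =====
-- 'if x ∈ acc then acc else acc ++ [x]' = Python's "if not in referenceOrder: append"
def insNew (acc : List Int) (x : Int) : List Int := if x ∈ acc then acc else acc ++ [x]

-- inner while: 'while i > numRefs and usePattern[i] == thisPage: i -= 1'
-- (thisPage starts as the empty list [] in Python, modelled as none: == with an int is then False)
def skipA (l : List Int) (numRefs : Int) (thisPage : Option Int) : Nat → Int → Int
  | 0, i => i
  | fuel + 1, i =>
    if i > numRefs then
      match PySem.List.pyGet? l i, thisPage with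
      | some v, some t => if v = t then skipA l numRefs thisPage fuel (i - 1) else i
      | _, _ => i
    else i

-- outer while: 'while i >= 0: …' (fuel ≥ number of iterations; i strictly decreases each pass)
def loopA (l : List Int) (numRefs : Int) : Nat → Int → List Int → Option Int → List Int
  | 0, _, acc, _ => acc
  | fuel + 1, i, acc, tp =>
    if i ≥ 0 then
      match PySem.List.pyGet? l i with
      | none => acc   -- unreachable: 0 ≤ i < numRefs = len(l), no IndexError
      | some p =>
        let acc' := insNew acc p
        let tp' := if p ∈ acc then tp else some p
        loopA l numRefs fuel (skipA l numRefs tp' fuel (i - 1)) acc' tp'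
    else acc

def getRefHistory (usePattern : List Int) : List Int :=
  let numRefs : Int := usePattern.length
  (loopA usePattern numRefs (usePattern.length + 1) (numRefs - 1) [] none).reverse

-- ===== PORT B =====
-- 'if page in order: del order[page]; order[page] = None' then 'list(order)'
def getRefHistory_alt (usePattern : List Int) : List Int :=
  (usePattern.foldl
    (fun d page =>
      ((if d.contains page then d.erase page else d).insert page (none : Option Int)))
    (PySem.Dict.empty : PySem.Dict Int (Option Int))).keys

-- ===== PRECONDITION & SPEC =====
def Spec_getRefHistory (usePattern : List Int) (out : List Int) : Prop := out = getRefHistory_alt usePattern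
instance (usePattern : List Int) (out : List Int) : Decidable (Spec_getRefHistory usePattern out) := by unfold Spec_getRefHistory; infer_instance

-- ===== CLAIM (what is proved, stated in full; the proofs are below) =====
def Claim_equal_getRefHistory : Prop := ∀ (usePattern : List Int), Dom_getRefHistory usePattern → Spec_getRefHistory usePattern (getRefHistory usePattern)

-- ===== LEMMAS AND PROOFS =====

-- abstract form of B's per-element step, on the key list
def moveEnd (ks : List Int) (x : Int) : List Int := ks.filter (fun k => !(k == x)) ++ [x]

theorem skipA_id (l : List Int) (numRefs : Int) (tp : Option Int) (fuel : Nat) (i : Int)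
    (h : i ≤ numRefs) : skipA l numRefs tp fuel i = i := by
  cases fuel with
  | zero => rfl
  | succ f => simp [skipA, not_lt.mpr h]

theorem loopA_eq (l : List Int) (k : Nat) (fuel : Nat) (hfuel : k ≤ fuel) (hk : k ≤ l.length) :
    ∀ acc tp, loopA l l.length fuel ((k : Int) - 1) acc tp
      = List.foldl insNew acc ((l.take k).reverse) := by
  induction k generalizing fuel with
  | zero =>
    intro acc tp
    cases fuel with
    | zero => rfl
    | succ f => simp [loopA]
  | succ k ih =>
    intro acc tp
    cases fuel with
    | zero => omega
    | succ f =>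
      have hk' : k < l.length := by omega
      have hi : ((k + 1 : Nat) : Int) - 1 = ((k : Nat) : Int) := by push_cast; ring
      rw [hi]
      have hget : PySem.List.pyGet? l ((k : Nat) : Int) = some l[k] := by
        rw [PySem.List.pyGet?_natCast]
        exact List.getElem?_eq_getElem hk'
      have htake : (l.take (k + 1)).reverse = l[k] :: (l.take k).reverse := by
        rw [List.take_add_one]
        simp [List.getElem?_eq_getElem hk']
      simp only [loopA, hget]
      have hge : ((k : Nat) : Int) ≥ 0 := Int.natCast_nonneg k
      rw [if_pos hge]
      rw [skipA_id l l.length _ f _ (by omega)]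
      rw [ih f (by omega) (by omega)]
      rw [htake]
      rfl

theorem getRefHistory_eq_foldl (l : List Int) :
    getRefHistory l = (List.foldl insNew [] l.reverse).reverse := by
  unfold getRefHistory
  have := loopA_eq l l.length (l.length + 1) (by omega) (le_refl _) [] none
  simp only [List.take_length] at this
  simp only [this]

-- ---- B side: keys of the dict fold ----

theorem stepB_items (d : PySem.Dict Int (Option Int)) (p : Int) :
    ((if d.contains p then d.erase p else d).insert p (none : Option Int)).items
      = d.items.filter (fun q => !(q.1 == p)) ++ [(p, (none : Option Int))] := by
  by_cases h : d.contains p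
  · have hc : (d.erase p).contains p = false := by
      simp [PySem.Dict.contains, PySem.Dict.erase, List.any_filter]
    simp only [h, if_true]
    rw [PySem.Dict.insert, if_neg (by simp [hc])]
    rfl
  · have hfix : d.items.filter (fun q => !(q.1 == p)) = d.items := by
      apply List.filter_eq_self.mpr
      intro q hq
      have hne : q.1 ≠ p := by
        intro hqp
        apply h
        rw [PySem.Dict.contains, List.any_eq_true]
        exact ⟨q, hq, by simp [hqp]⟩
      simp [hne]
    simp only [h]
    rw [PySem.Dict.insert]
    simp [h, hfix]

theorem foldB_keys (l : List Int) :
    ∀ d : PySem.Dict Int (Option Int),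
      (l.foldl (fun d page => ((if d.contains page then d.erase page else d).insert page (none : Option Int))) d).keys
        = l.foldl moveEnd d.keys := by
  induction l with
  | nil => intro d; rfl
  | cons x xs ih =>
    intro d
    simp only [List.foldl_cons]
    rw [ih]
    congr 1
    show ((if d.contains x then d.erase x else d).insert x (none : Option Int)).keys = moveEnd d.keys x
    simp only [PySem.Dict.keys, stepB_items, moveEnd, List.map_append, List.map_cons, List.map_nil]
    congr 1
    rw [List.filter_map]
    rfl

-- ---- the common value: dedup of the reverse, reversed = fold of moveEnd ----

theorem foldl_insNew_filter (xs : List Int) (x : Int) :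
    ∀ acc, x ∈ acc →
      List.foldl insNew acc xs = List.foldl insNew acc (xs.filter (fun y => !(y == x))) := by
  induction xs with
  | nil => intro acc _; rfl
  | cons y ys ih =>
    intro acc hx
    by_cases hyx : y = x
    · subst hyx
      have h1 : insNew acc y = acc := by simp [insNew, hx]
      have h2 : List.filter (fun z => !(z == y)) (y :: ys) = List.filter (fun z => !(z == y)) ys := by
        simp
      rw [h2, List.foldl_cons, h1]
      exact ih acc hx
    · simp only [List.filter_cons, Bool.not_eq_eq_eq_not, Bool.not_true]
      rw [if_pos (by simp [hyx])]
      simp only [List.foldl_cons]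
      have hx' : x ∈ insNew acc y := by
        unfold insNew
        split
        · exact hx
        · exact List.mem_append_left _ hx
      exact ih (insNew acc y) hx'

theorem foldl_insNew_cons (xs : List Int) (x : Int) (h : ∀ y ∈ xs, y ≠ x) :
    ∀ acc, List.foldl insNew (x :: acc) xs = x :: List.foldl insNew acc xs := by
  induction xs with
  | nil => intro acc; rfl
  | cons y ys ih =>
    intro acc
    have hyx : y ≠ x := h y (by simp)
    have hmem : (y ∈ x :: acc) ↔ (y ∈ acc) := by simp [hyx]
    have step : insNew (x :: acc) y = x :: insNew acc y := by
      unfold insNew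
      by_cases hy : y ∈ acc
      · simp [hy, hmem]
      · simp [hy, hyx]
    simp only [List.foldl_cons, step]
    exact ih (fun z hz => h z (by simp [hz])) (insNew acc y)

theorem foldl_insNew_filter_comm (xs : List Int) (q : Int → Bool) :
    ∀ acc, List.foldl insNew (acc.filter q) (xs.filter q) = (List.foldl insNew acc xs).filter q := by
  induction xs with
  | nil => intro acc; rfl
  | cons x ys ih =>
    intro acc
    by_cases hq : q x
    · have hins : insNew (acc.filter q) x = (insNew acc x).filter q := by
        unfold insNew
        by_cases hx : x ∈ acc
        · simp [hx, List.mem_filter, hq]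
        · have : x ∉ acc.filter q := fun hc => hx (List.mem_of_mem_filter hc)
          simp [hx, this, List.filter_append, hq]
      simp only [List.filter_cons, if_pos hq, List.foldl_cons, hins]
      exact ih (insNew acc x)
    · have hins : (insNew acc x).filter q = acc.filter q := by
        unfold insNew
        by_cases hx : x ∈ acc
        · simp [hx]
        · simp [hx, List.filter_append, hq]
      simp only [List.filter_cons, if_neg hq, List.foldl_cons]
      rw [← hins]
      exact ih (insNew acc x)

theorem dedup_rev_eq_moveEnd (l : List Int) :
    (List.foldl insNew [] l.reverse).reverse = l.foldl moveEnd [] := by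
  induction l using List.reverseRecOn with
  | nil => rfl
  | append_singleton m x ih =>
    have hrev : (m ++ [x]).reverse = x :: m.reverse := by simp
    have hstart : List.foldl insNew [] (x :: m.reverse) = List.foldl insNew [x] m.reverse := by
      simp [insNew]
    set q : Int → Bool := fun y => !(y == x) with hq
    have h1 : List.foldl insNew [x] m.reverse = List.foldl insNew [x] (m.reverse.filter q) :=
      foldl_insNew_filter m.reverse x [x] (by simp)
    have h2 : List.foldl insNew [x] (m.reverse.filter q) = x :: List.foldl insNew [] (m.reverse.filter q) := by
      apply foldl_insNew_cons
      intro y hy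
      have := List.of_mem_filter hy
      simpa [hq] using this
    have h3 : List.foldl insNew [] (m.reverse.filter q) = (List.foldl insNew [] m.reverse).filter q := by
      have := foldl_insNew_filter_comm m.reverse q []
      simpa using this
    calc (List.foldl insNew [] (m ++ [x]).reverse).reverse
        = (x :: (List.foldl insNew [] m.reverse).filter q).reverse := by
          rw [hrev, hstart, h1, h2, h3]
      _ = ((List.foldl insNew [] m.reverse).filter q).reverse ++ [x] := by simp
      _ = ((List.foldl insNew [] m.reverse).reverse).filter q ++ [x] := by
          rw [List.filter_reverse]
      _ = (m.foldl moveEnd []).filter q ++ [x] := by rw [ih]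
      _ = (m ++ [x]).foldl moveEnd [] := by
          simp [moveEnd, hq]

-- ===== VERDICT (by name: the statement is the Claim_ definition above) =====
theorem getRefHistory_spec : Claim_equal_getRefHistory := by
  intro l _
  unfold Spec_getRefHistory
  rw [getRefHistory_eq_foldl, dedup_rev_eq_moveEnd]
  unfold getRefHistory_alt
  rw [foldB_keys]
  rfl
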